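-- pv_equiv track=rewrite | github.com/kilian-hu/hackerrank-solutions | certificates/problem-solving-intermediate/nice-teams/solution.py | maxPairs
-- ===== SOURCE A (Python) =====
-- def maxPairs(skillLevel, minDiff):
--     skillLevel.sort()
--     n = len(skillLevel)
--     i = 0
--     x = []
--     for j in range(n // 2):
--         while i < n and skillLevel[i] - skillLevel[j] < minDiff:
--             i += 1
--         if i >= n:
--             break
--         x.append(i)
--     x = x[:(n // 2)]
--     ans = 0
--     k = n - 1
--     for y in reversed(x):
--         if y <= k:
--             ans += 1
--             k -= 1
--     return ans
-- ===== SOURCE B (Python) =====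
-- def maxPairs(skillLevel, minDiff):
--     skillLevel.sort()
--     n = len(skillLevel)
--     i = 0
--     j = n // 2
--     ans = 0
--     while i < n // 2 and j < n:
--         if skillLevel[j] - skillLevel[i] >= minDiff:
--             ans += 1
--             i += 1
--             j += 1
--         else:
--             j += 1
--     return ans
-- ===== Notes on version B (the rewrite author's own statement) =====
-- stated objective: simpler
-- what changed: Replaces A's two-stage body (build the list of least-feasible-partner indices, then a reverse greedy match with a descending cursor) by the standard single forward two-pointer pass over the sorted list (low pointer in the lower half, high pointer from n//2), with no intermediate list.
import Mathlib
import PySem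

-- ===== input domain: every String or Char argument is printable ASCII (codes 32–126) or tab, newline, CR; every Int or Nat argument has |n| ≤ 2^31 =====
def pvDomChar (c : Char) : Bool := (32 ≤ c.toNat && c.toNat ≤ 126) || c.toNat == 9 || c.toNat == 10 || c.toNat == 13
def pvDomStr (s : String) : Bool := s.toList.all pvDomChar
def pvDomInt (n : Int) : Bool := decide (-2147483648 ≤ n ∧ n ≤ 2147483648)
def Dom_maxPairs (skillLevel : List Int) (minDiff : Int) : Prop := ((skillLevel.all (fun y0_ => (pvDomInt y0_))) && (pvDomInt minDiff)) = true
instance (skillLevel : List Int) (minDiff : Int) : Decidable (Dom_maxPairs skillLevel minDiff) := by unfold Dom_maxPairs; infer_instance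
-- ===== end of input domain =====

-- B replaces A's two-stage body (threshold-index list + reverse greedy) by one forward
-- two-pointer pass over the sorted list; objective: simpler. Both Pythons sort the
-- argument in place (same mutation); the equivalence proved is about the return value.

-- ===== PORT A =====
-- inner 'while i < n and skillLevel[i] - skillLevel[j] < minDiff: i += 1'
-- (loop indices are nonnegative and guarded to be in range, so s.getD is exact for s[i])
def aWhile (s : List Int) (minDiff sj : Int) (i : Nat) : Nat :=
  if i < s.length then
    if s.getD i 0 - sj < minDiff then aWhile s minDiff sj (i + 1) else i
  else i
termination_by s.length - i

-- 'for j in range(n // 2): …' with the running i, the break, and the appends;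
-- fuel = number of remaining values of j
def aLoop1 (s : List Int) (minDiff : Int) (j fuel i : Nat) (x : List Nat) : List Nat :=
  match fuel with
  | 0 => x
  | fuel + 1 =>
    let i' := aWhile s minDiff (s.getD j 0) i
    if i' ≥ s.length then x
    else aLoop1 s minDiff (j + 1) fuel i' (x ++ [i'])

-- 'for y in reversed(x): if y <= k: ans += 1; k -= 1' (called on x.reverse)
def aLoop2 (x : List Nat) (k ans : Int) : Int :=
  match x with
  | [] => ans
  | y :: ys => if (y : Int) ≤ k then aLoop2 ys (k - 1) (ans + 1) else aLoop2 ys k ans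

def maxPairs (skillLevel : List Int) (minDiff : Int) : Int :=
  let s := PySem.List.sorted skillLevel (fun v => v) false
  let n := s.length
  let x := aLoop1 s minDiff 0 (n / 2) 0 []
  let x := x.take (n / 2)        -- x = x[:(n // 2)]
  aLoop2 x.reverse ((n : Int) - 1) 0

-- ===== PORT B =====
-- 'while i < n // 2 and j < n: …' (indices nonnegative and in range, s.getD exact)
def bLoop (s : List Int) (minDiff : Int) (i j : Nat) (ans : Int) : Int :=
  if i < s.length / 2 ∧ j < s.length then
    if s.getD j 0 - s.getD i 0 ≥ minDiff then bLoop s minDiff (i + 1) (j + 1) (ans + 1)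
    else bLoop s minDiff i (j + 1) ans
  else ans
termination_by s.length - j

def maxPairs_alt (skillLevel : List Int) (minDiff : Int) : Int :=
  let s := PySem.List.sorted skillLevel (fun v => v) false
  bLoop s minDiff 0 (s.length / 2) 0

-- ===== PRECONDITION & SPEC =====
def Spec_maxPairs (skillLevel : List Int) (minDiff : Int) (out : Int) : Prop := out = maxPairs_alt skillLevel minDiff
instance (skillLevel : List Int) (minDiff : Int) (out : Int) : Decidable (Spec_maxPairs skillLevel minDiff out) := by unfold Spec_maxPairs; infer_instance

-- ===== CLAIM (what is proved, stated in full; the proofs are below) =====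
def Claim_equal_maxPairs : Prop := ∀ (skillLevel : List Int) (minDiff : Int), Dom_maxPairs skillLevel minDiff → Spec_maxPairs skillLevel minDiff (maxPairs skillLevel minDiff)

-- ===== LEMMAS AND PROOFS =====

-- monotone access into a sorted list
theorem sget_mono {s : List Int} (hs : s.Pairwise (· ≤ ·)) {a b : Nat}
    (hab : a ≤ b) (hb : b < s.length) : s.getD a 0 ≤ s.getD b 0 := by
  rcases Nat.lt_or_ge a b with h | h
  · rw [List.getD_eq_getElem s 0 (by omega), List.getD_eq_getElem s 0 hb]
    exact List.pairwise_iff_getElem.mp hs a b (by omega) hb h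
  · have : a = b := by omega
    subst this; rfl

-- characterisation of aWhile: least index ≥ i meeting the threshold (or length)
theorem aWhile_char (s : List Int) (d sj : Int) (i : Nat) (hi : i ≤ s.length) :
    i ≤ aWhile s d sj i ∧ aWhile s d sj i ≤ s.length ∧
    (∀ u, i ≤ u → u < aWhile s d sj i → s.getD u 0 - sj < d) ∧
    (aWhile s d sj i < s.length → s.getD (aWhile s d sj i) 0 - sj ≥ d) := by
  fun_induction aWhile s d sj i with
  | case1 i h1 h2 ih =>
    obtain ⟨a, b, c, e⟩ := ih (by omega)
    refine ⟨by omega, b, ?_, e⟩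
    intro u hu1 hu2
    rcases Nat.eq_or_lt_of_le hu1 with rfl | h
    · exact h2
    · exact c u h hu2
  | case2 i h1 h2 => exact ⟨le_refl _, by omega, by omega, fun _ => by omega⟩
  | case3 i h1 => exact ⟨le_refl _, hi, by omega, by omega⟩

-- accumulator lemma for aLoop1
theorem aLoop1_acc (s : List Int) (d : Int) (j fuel i : Nat) (x : List Nat) :
    aLoop1 s d j fuel i x = x ++ aLoop1 s d j fuel i [] := by
  induction fuel generalizing j i x with
  | zero => simp [aLoop1]
  | succ fuel ih =>
    show (if aWhile s d (s.getD j 0) i ≥ s.length then x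
          else aLoop1 s d (j + 1) fuel (aWhile s d (s.getD j 0) i) (x ++ [aWhile s d (s.getD j 0) i]))
       = x ++ (if aWhile s d (s.getD j 0) i ≥ s.length then ([] : List Nat)
          else aLoop1 s d (j + 1) fuel (aWhile s d (s.getD j 0) i) ([] ++ [aWhile s d (s.getD j 0) i]))
    split
    · simp
    · rw [ih, ih _ _ ([] ++ [aWhile s d (s.getD j 0) i])]
      simp

-- the main characterisation of A's first loop
theorem aX_char (s : List Int) (d : Int) (hs : s.Pairwise (· ≤ ·)) :
    ∀ fuel j i, j + fuel ≤ s.length / 2 → i ≤ s.length →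
    (∀ u, u < i → s.getD u 0 < s.getD j 0 + d) →
    (aLoop1 s d j fuel i []).length ≤ fuel ∧
    (∀ t, t < (aLoop1 s d j fuel i []).length →
        (aLoop1 s d j fuel i []).getD t 0 < s.length ∧
        s.getD (j + t) 0 + d ≤ s.getD ((aLoop1 s d j fuel i []).getD t 0) 0 ∧
        (∀ u, u < (aLoop1 s d j fuel i []).getD t 0 → s.getD u 0 < s.getD (j + t) 0 + d)) ∧
    ((aLoop1 s d j fuel i []).length = fuel ∨
        ∀ u, u < s.length → s.getD u 0 < s.getD (j + (aLoop1 s d j fuel i []).length) 0 + d) := by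
  intro fuel
  induction fuel with
  | zero =>
    intro j i _ _ _
    exact ⟨by simp [aLoop1], by simp [aLoop1], Or.inl (by simp [aLoop1])⟩
  | succ fuel ih =>
    intro j i hj hi hmin
    obtain ⟨w1, w2, w3, w4⟩ := aWhile_char s d (s.getD j 0) i hi
    have hiall : ∀ u, u < aWhile s d (s.getD j 0) i → s.getD u 0 < s.getD j 0 + d := by
      intro u hu
      rcases Nat.lt_or_ge u i with h | h
      · exact hmin u h
      · have := w3 u h hu; omega
    by_cases hbig : aWhile s d (s.getD j 0) i ≥ s.length
    · have hX : aLoop1 s d j (fuel + 1) i [] = [] := by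
        show (if aWhile s d (s.getD j 0) i ≥ s.length then ([] : List Nat) else _) = []
        rw [if_pos hbig]
      rw [hX]
      refine ⟨by simp, by simp, Or.inr ?_⟩
      intro u hu
      have : u < aWhile s d (s.getD j 0) i := by omega
      simpa using hiall u this
    · push_neg at hbig
      have hX : aLoop1 s d j (fuel + 1) i []
          = aWhile s d (s.getD j 0) i :: aLoop1 s d (j + 1) fuel (aWhile s d (s.getD j 0) i) [] := by
        show (if aWhile s d (s.getD j 0) i ≥ s.length then ([] : List Nat)
              else aLoop1 s d (j + 1) fuel (aWhile s d (s.getD j 0) i) ([] ++ [aWhile s d (s.getD j 0) i]))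
            = _
        rw [if_neg (by omega), aLoop1_acc]
        simp
      have hthr : s.getD j 0 + d ≤ s.getD (aWhile s d (s.getD j 0) i) 0 := by
        have := w4 hbig; omega
      rw [hX]
      rcases Nat.eq_zero_or_pos fuel with rfl | hfpos
      · have hX' : aLoop1 s d (j + 1) 0 (aWhile s d (s.getD j 0) i) [] = [] := by simp [aLoop1]
        rw [hX']
        refine ⟨by simp, ?_, Or.inl (by simp)⟩
        intro t ht
        simp only [List.length_cons, List.length_nil] at ht
        have : t = 0 := by omega
        subst this
        simp only [List.getD_cons_zero, Nat.add_zero]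
        exact ⟨hbig, hthr, hiall⟩
      · -- fuel ≥ 1
        have hj1 : j + 1 < s.length := by omega
        have hmono : s.getD j 0 ≤ s.getD (j + 1) 0 := sget_mono hs (by omega) hj1
        have hmin' : ∀ u, u < aWhile s d (s.getD j 0) i → s.getD u 0 < s.getD (j + 1) 0 + d := by
          intro u hu; have := hiall u hu; omega
        obtain ⟨ih1, ih2, ih3⟩ := ih (j + 1) (aWhile s d (s.getD j 0) i) (by omega) (by omega) hmin'
        refine ⟨by simp only [List.length_cons]; omega, ?_, ?_⟩
        · intro t ht
          simp only [List.length_cons] at ht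
          match t with
          | 0 =>
            simp only [List.getD_cons_zero, Nat.add_zero]
            exact ⟨hbig, hthr, hiall⟩
          | t + 1 =>
            have ht' : t < (aLoop1 s d (j + 1) fuel (aWhile s d (s.getD j 0) i) []).length := by omega
            obtain ⟨p1, p2, p3⟩ := ih2 t ht'
            have e : j + (t + 1) = (j + 1) + t := by omega
            rw [List.getD_cons_succ, e]
            exact ⟨p1, p2, p3⟩
        · rcases ih3 with h | h
          · left; simp only [List.length_cons]; omega
          · right
            intro u hu
            have := h u hu
            have e : j + (aWhile s d (s.getD j 0) i :: aLoop1 s d (j + 1) fuel (aWhile s d (s.getD j 0) i) []).length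
                   = (j + 1) + (aLoop1 s d (j + 1) fuel (aWhile s d (s.getD j 0) i) []).length := by
              simp only [List.length_cons]; omega
            rw [e]
            exact this

-- Nat-valued mirror of A's second loop
def LN (z : List Nat) (k : Int) : Nat :=
  match z with
  | [] => 0
  | v :: zs => if (v : Int) ≤ k then LN zs (k - 1) + 1 else LN zs k

theorem aLoop2_eq (z : List Nat) (k ans : Int) : aLoop2 z k ans = ans + (LN z k : Int) := by
  induction z generalizing k ans with
  | nil => simp [aLoop2, LN]
  | cons v zs ih =>
    simp only [aLoop2, LN]
    split
    · rw [ih]; push_cast; ring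
    · rw [ih]

theorem LN_le (z : List Nat) (k : Int) : LN z k ≤ z.length := by
  induction z generalizing k with
  | nil => simp [LN]
  | cons v zs ih =>
    simp only [LN, List.length_cons]
    split
    · have := ih (k - 1); omega
    · have := ih k; omega

theorem LN_sound (z : List Nat) (k : Int) (hz : z.Pairwise (fun a b => b ≤ a)) :
    ∀ t, t < LN z k → (z.getD (z.length - LN z k + t) 0 : Int) ≤ k - t := by
  induction z generalizing k with
  | nil => intro t ht; simp [LN] at ht
  | cons v zs ih =>
    rw [List.pairwise_cons] at hz
    obtain ⟨hv, hz'⟩ := hz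
    intro t ht
    simp only [LN, List.length_cons] at *
    split at ht
    · -- v ≤ k : LN = LN zs (k-1) + 1
      rename_i hvk
      rw [if_pos hvk]
      set c' := LN zs (k - 1) with hc'
      have hc'le : c' ≤ zs.length := LN_le zs (k - 1)
      rcases Nat.eq_zero_or_pos t with rfl | htpos
      · -- t = 0
        rcases Nat.eq_or_lt_of_le hc'le with he | hlt
        · have : zs.length + 1 - (c' + 1) + 0 = 0 := by omega
          rw [this]
          simpa using hvk
        · have : zs.length + 1 - (c' + 1) + 0 = (zs.length - c' - 1) + 1 := by omega
          rw [this, List.getD_cons_succ]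
          have hin : zs.length - c' - 1 < zs.length := by omega
          have hmem : zs.getD (zs.length - c' - 1) 0 ∈ zs := by
            rw [List.getD_eq_getElem _ _ hin]; exact List.getElem_mem hin
          have := hv _ hmem
          push_cast
          omega
      · -- t ≥ 1
        obtain ⟨t', rfl⟩ : ∃ t', t = t' + 1 := ⟨t - 1, by omega⟩
        have ht' : t' < c' := by omega
        have := ih (k - 1) hz' t' ht'
        rw [← hc'] at this
        have hidx : zs.length + 1 - (c' + 1) + (t' + 1) = (zs.length - c' + t') + 1 := by omega
        rw [hidx, List.getD_cons_succ]
        push_cast at this ⊢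
        omega
    · -- ¬ v ≤ k : LN = LN zs k
      rename_i hvk
      rw [if_neg hvk]
      set c := LN zs k with hc
      have hcle : c ≤ zs.length := LN_le zs k
      have hidx : zs.length + 1 - c + t = (zs.length - c + t) + 1 := by omega
      rw [hidx, List.getD_cons_succ]
      exact ih k hz' t ht

theorem LN_complete (z : List Nat) (k : Int) (c : Nat) (hc : c ≤ z.length)
    (h : ∀ t, t < c → (z.getD (z.length - c + t) 0 : Int) ≤ k - t) : c ≤ LN z k := by
  induction z generalizing k c with
  | nil => simp only [List.length_nil, Nat.le_zero] at hc; simp [LN, hc]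
  | cons v zs ih =>
    simp only [List.length_cons] at hc
    simp only [LN]
    split
    · -- v ≤ k
      rename_i hvk
      rcases Nat.eq_zero_or_pos c with rfl | hcpos
      · omega
      · have step : c - 1 ≤ LN zs (k - 1) := by
          apply ih (k - 1) (c - 1) (by omega)
          intro t ht
          have := h (t + 1) (by omega)
          simp only [List.length_cons] at this
          have hidx : zs.length + 1 - c + (t + 1) = (zs.length - (c - 1) + t) + 1 := by omega
          rw [hidx, List.getD_cons_succ] at this
          push_cast at this ⊢
          omega
        omega
    · -- ¬ v ≤ k
      rename_i hvk
      have hcz : c ≤ zs.length := by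
        by_contra hgt
        have hce : c = zs.length + 1 := by omega
        have := h 0 (by omega)
        rw [hce] at this
        simp at this
        exact hvk this
      apply ih k c hcz
      intro t ht
      have := h t ht
      simp only [List.length_cons] at this
      have hidx : zs.length + 1 - c + t = (zs.length - c + t) + 1 := by omega
      rw [hidx, List.getD_cons_succ] at this
      exact this

-- Nat-valued mirror of B's loop
def bN (s : List Int) (d : Int) (i j : Nat) : Nat :=
  if i < s.length / 2 ∧ j < s.length then
    if s.getD j 0 - s.getD i 0 ≥ d then bN s d (i + 1) (j + 1) + 1
    else bN s d i (j + 1)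
  else 0
termination_by s.length - j

theorem bLoop_eq (s : List Int) (d : Int) (i j : Nat) (ans : Int) :
    bLoop s d i j ans = ans + (bN s d i j : Int) := by
  fun_induction bLoop s d i j ans with
  | case1 i j ans h1 h2 ih =>
    rw [ih]; conv_rhs => rw [bN, if_pos h1, if_pos h2]
    push_cast; ring
  | case2 i j ans h1 h2 ih =>
    rw [ih]; conv_rhs => rw [bN, if_pos h1, if_neg h2]
  | case3 i j ans h1 => rw [bN]; simp [h1]

theorem bN_le_half (s : List Int) (d : Int) (i j : Nat) : bN s d i j ≤ s.length / 2 - i := by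
  fun_induction bN s d i j with
  | case1 i j h1 h2 ih => omega
  | case2 i j h1 h2 ih => omega
  | case3 i j h1 => omega

theorem bN_le_rem (s : List Int) (d : Int) (i j : Nat) : bN s d i j ≤ s.length - j := by
  fun_induction bN s d i j with
  | case1 i j h1 h2 ih => omega
  | case2 i j h1 h2 ih => omega
  | case3 i j h1 => omega

theorem bN_sound (s : List Int) (d : Int) (hs : s.Pairwise (· ≤ ·)) (i j : Nat) :
    ∀ t, t < bN s d i j →
      s.getD (i + t) 0 + d ≤ s.getD (s.length - bN s d i j + t) 0 := by
  fun_induction bN s d i j with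
  | case1 i j h1 h2 ih =>
    intro t ht
    have hrem : bN s d (i + 1) (j + 1) ≤ s.length - (j + 1) := bN_le_rem s d (i + 1) (j + 1)
    rcases Nat.eq_zero_or_pos t with rfl | htpos
    · have hle : j ≤ s.length - (bN s d (i + 1) (j + 1) + 1) + 0 := by omega
      have hlt : s.length - (bN s d (i + 1) (j + 1) + 1) + 0 < s.length := by omega
      have := sget_mono hs hle hlt
      simp only [Nat.add_zero] at this ⊢
      omega
    · obtain ⟨t', rfl⟩ : ∃ t', t = t' + 1 := ⟨t - 1, by omega⟩
      have := ih t' (by omega)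
      have e1 : i + (t' + 1) = i + 1 + t' := by omega
      have e2 : s.length - (bN s d (i + 1) (j + 1) + 1) + (t' + 1)
              = s.length - bN s d (i + 1) (j + 1) + t' := by omega
      rw [e1, e2]
      exact this
  | case2 i j h1 h2 ih => exact ih
  | case3 i j h1 => intro t ht; simp at ht

theorem bN_complete (s : List Int) (d : Int) (hs : s.Pairwise (· ≤ ·)) (i j : Nat) :
    ∀ c, i + c ≤ s.length / 2 → j + c ≤ s.length →
      (∀ t, t < c → s.getD (i + t) 0 + d ≤ s.getD (s.length - c + t) 0) →
      c ≤ bN s d i j := by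
  fun_induction bN s d i j with
  | case1 i j h1 h2 ih =>
    intro c hch hcn h
    rcases Nat.eq_zero_or_pos c with rfl | hcpos
    · omega
    · have step : c - 1 ≤ bN s d (i + 1) (j + 1) := by
        apply ih (c - 1) (by omega) (by omega)
        intro t ht
        have := h (t + 1) (by omega)
        have e1 : i + (t + 1) = i + 1 + t := by omega
        have e2 : s.length - c + (t + 1) = s.length - (c - 1) + t := by omega
        rw [e1, e2] at this
        exact this
      omega
  | case2 i j h1 h2 ih =>
    intro c hch hcn h
    rcases Nat.eq_zero_or_pos c with rfl | hcpos
    · omega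
    · apply ih c hch ?_ ?_
      · -- j + c < s.length + 1, and j + c ≠ s.length since otherwise s[j] ≥ s[i] + d
        rcases Nat.eq_or_lt_of_le hcn with he | hlt
        · exfalso
          have := h 0 (by omega)
          have e : s.length - c + 0 = j := by omega
          rw [e] at this
          simp only [Nat.add_zero] at this
          omega
        · omega
      · intro t ht; exact h t ht
  | case3 i j h1 =>
    intro c hch hcn h
    -- loop guard failed: i ≥ len/2 or j ≥ len; either forces c = 0
    rcases Nat.eq_zero_or_pos c with rfl | hcpos
    · omega
    · exfalso; push_neg at h1; omega

-- getD through reverse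
theorem getD_reverse (l : List Nat) (q : Nat) (hq : q < l.length) :
    l.reverse.getD q 0 = l.getD (l.length - 1 - q) 0 := by
  rw [List.getD_eq_getElem _ 0 (by simpa using hq), List.getD_eq_getElem _ 0 (by omega)]
  simp [List.getElem_reverse]

-- the two loop results agree on any sorted list
theorem final_eq (s : List Int) (d : Int) (hs : s.Pairwise (· ≤ ·)) :
    aLoop2 ((aLoop1 s d 0 (s.length / 2) 0 []).take (s.length / 2)).reverse ((s.length : Int) - 1) 0
      = bLoop s d 0 (s.length / 2) 0 := by
  obtain ⟨hlen, hP, hbr⟩ := aX_char s d hs (s.length / 2) 0 0 (by omega) (by omega)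
    (fun u hu => absurd hu (by omega))
  simp only [Nat.zero_add] at hP hbr
  set n := s.length with hn
  set x := aLoop1 s d 0 (n / 2) 0 [] with hx
  set m := x.length with hm
  rw [List.take_of_length_le hlen, aLoop2_eq, bLoop_eq]
  set cA := LN x.reverse ((n : Int) - 1) with hcA
  set cB := bN s d 0 (n / 2) with hcB
  suffices h : cA = cB by rw [h]
  -- x is nondecreasing
  have hx_mono : x.Pairwise (· ≤ ·) := by
    rw [List.pairwise_iff_getElem]
    intro p q hp hq hpq
    by_contra hgt
    push_neg at hgt
    obtain ⟨q1, q2, q3⟩ := hP q hq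
    obtain ⟨p1, p2, p3⟩ := hP p hp
    have hqn : q < n := by omega
    have hpq' : s.getD p 0 ≤ s.getD q 0 := sget_mono hs (by omega) hqn
    have hgd : x.getD q 0 < x.getD p 0 := by
      rw [List.getD_eq_getElem _ _ hq, List.getD_eq_getElem _ _ hp]; omega
    have := p3 (x.getD q 0) hgd
    omega
  have hxrev : x.reverse.Pairwise (fun a b => b ≤ a) := by
    rw [List.pairwise_reverse]; exact hx_mono
  have hcAm : cA ≤ m := by
    have := LN_le x.reverse ((n : Int) - 1)
    simpa using this
  -- soundness of A's value
  have hAs : ∀ t, t < cA → (x.getD t 0 : Int) ≤ (n : Int) - cA + t := by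
    intro t ht
    have hts : cA - 1 - t < cA := by omega
    have := LN_sound x.reverse ((n : Int) - 1) hxrev (cA - 1 - t) hts
    rw [← hcA] at this
    have hq : m - 1 - t < m := by omega
    have hidx : x.reverse.length - cA + (cA - 1 - t) = m - 1 - t := by
      simp only [List.length_reverse, ← hm]; omega
    rw [hidx, getD_reverse x _ hq] at this
    have hidx2 : m - 1 - (m - 1 - t) = t := by omega
    rw [hidx2] at this
    have hcast : ((cA - 1 - t : Nat) : Int) = (cA : Int) - 1 - t := by omega
    omega
  -- cA ≤ cB
  have h1 : cA ≤ cB := by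
    apply bN_complete s d hs 0 (n / 2) cA (by simp only [← hn]; omega) (by simp only [← hn]; omega)
    intro t ht
    simp only [← hn]
    obtain ⟨t1, t2, _⟩ := hP t (by omega)
    have hA := hAs t ht
    have hxn : x.getD t 0 ≤ n - cA + t := by omega
    have hlt : n - cA + t < n := by omega
    have := sget_mono hs hxn hlt
    simp only [Nat.zero_add]
    omega
  -- soundness of B's value
  have hBs := bN_sound s d hs 0 (n / 2)
  simp only [Nat.zero_add, ← hcB, ← hn] at hBs
  have hcBh : cB ≤ n / 2 := by
    have := bN_le_half s d 0 (n / 2); simp only [← hcB, ← hn] at this; omega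
  have hcBm : cB ≤ m := by
    by_contra hgt
    push_neg at hgt
    rcases hbr with he | hbig
    · omega
    · have hmlt : m < cB := hgt
      have hsnd := hBs m (by omega)
      have hu : n - cB + m < n := by omega
      have := hbig (n - cB + m) hu
      omega
  have h2 : cB ≤ cA := by
    apply LN_complete x.reverse ((n : Int) - 1) cB (by simpa using hcBm)
    intro t ht
    have hq : m - cB + t < m := by omega
    have hidx : x.reverse.length - cB + t = m - cB + t := by
      simp only [List.length_reverse, ← hm]
    rw [hidx, getD_reverse x _ hq]
    have hidx2 : m - 1 - (m - cB + t) = cB - 1 - t := by omega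
    rw [hidx2]
    set t' := cB - 1 - t with ht'
    have ht'lt : t' < cB := by omega
    obtain ⟨t1, t2, t3⟩ := hP t' (by omega)
    have hxb : x.getD t' 0 ≤ n - cB + t' := by
      by_contra hb
      push_neg at hb
      have := t3 (n - cB + t') hb
      have := hBs t' ht'lt
      omega
    have : (x.getD t' 0 : Int) ≤ (n : Int) - cB + t' := by omega
    omega
  omega

-- ===== VERDICT (by name: the statement is the Claim_ definition above) =====
theorem maxPairs_spec : Claim_equal_maxPairs := by
  unfold Claim_equal_maxPairs
  intro skillLevel minDiff _
  unfold Spec_maxPairs maxPairs maxPairs_alt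
  exact final_eq (PySem.List.sorted skillLevel (fun v => v) false) minDiff
    (PySem.List.sorted_pairwise skillLevel (fun v => v))
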